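-- pv_equiv track=rewrite | github.com/paiml/depyler | examples/hard_sequence_diff.py | is_polynomial_degree
-- ===== SOURCE A (Python) =====
-- def first_difference(arr: list[int]) -> list[int]:
--     """Compute first differences: d[i] = arr[i+1] - arr[i]."""
--     result: list[int] = []
--     idx: int = 0
--     length: int = len(arr)
--     limit: int = length - 1
--     while idx < limit:
--         next_idx: int = idx + 1
--         result.append(arr[next_idx] - arr[idx])
--         idx = idx + 1
--     return result
--
-- def is_polynomial_degree(arr: list[int], degree: int) -> int:
--     """Check if sequence is polynomial of given degree by checking constant nth differences.
--     Returns 1 if yes, 0 if no."""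
--     current: list[int] = []
--     ci: int = 0
--     while ci < len(arr):
--         current.append(arr[ci])
--         ci = ci + 1
--     d: int = 0
--     while d < degree:
--         current = first_difference(current)
--         d = d + 1
--     idx: int = 1
--     length: int = len(current)
--     while idx < length:
--         if current[idx] != current[0]:
--             return 0
--         idx = idx + 1
--     return 1
-- ===== SOURCE B (Python) =====
-- def is_polynomial_degree(arr, degree):
--     """Check constancy of the degree-th finite differences, computed directly
--     via binomial coefficients instead of repeatedly differencing the list."""
--     k = degree if degree > 0 else 0
--     n = len(arr)
--     if n - k < 2:
--         return 1
--     row = [1]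
--     for _ in range(k):
--         row = [1] + [row[j] + row[j + 1] for j in range(len(row) - 1)] + [1]
--
--     def entry(i):
--         return sum((-1) ** j * row[j] * arr[i + k - j] for j in range(k + 1))
--
--     d0 = entry(0)
--     return 1 if all(entry(i) == d0 for i in range(1, n - k)) else 0
-- ===== Notes on version B (the rewrite author's own statement) =====
-- stated objective: alternative
-- what changed: Instead of repeatedly rebuilding shrinking difference lists degree times, B clamps the degree, builds one Pascal row of binomial coefficients, and evaluates each degree-th difference directly as an alternating binomial sum, with an early return when fewer than two such differences exist.
import Mathlib
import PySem

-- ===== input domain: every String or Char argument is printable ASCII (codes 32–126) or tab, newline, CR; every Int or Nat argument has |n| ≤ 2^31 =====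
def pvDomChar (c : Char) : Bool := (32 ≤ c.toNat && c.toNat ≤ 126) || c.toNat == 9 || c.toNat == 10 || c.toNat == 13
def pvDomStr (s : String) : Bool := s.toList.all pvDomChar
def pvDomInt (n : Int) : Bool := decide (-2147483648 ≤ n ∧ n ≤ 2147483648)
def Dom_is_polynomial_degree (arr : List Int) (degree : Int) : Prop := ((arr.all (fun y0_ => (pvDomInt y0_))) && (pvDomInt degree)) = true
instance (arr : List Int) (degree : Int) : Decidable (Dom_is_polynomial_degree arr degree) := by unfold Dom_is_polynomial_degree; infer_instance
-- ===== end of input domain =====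

-- B replaces the repeated first-difference passes by one direct alternating
-- binomial-sum evaluation of the degree-th differences (alternative decomposition).

-- ===== PORT A =====
def first_difference (arr : List Int) : List Int :=
  (PySem.List.pyRange 0 (PySem.List.len arr - 1) 1).foldl
    (fun result idx =>
      result ++ [PySem.List.pyGetD arr (idx + 1) 0 - PySem.List.pyGetD arr idx 0]) []

-- the `while d < degree` loop of A
def pvDiffLoop (current : List Int) (d : Int) (degree : Int) : List Int :=
  if d < degree then pvDiffLoop (first_difference current) (d + 1) degree else current
termination_by (degree - d).toNat
decreasing_by omega

-- the final `while idx < length` loop of A (early return 0)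
def pvCheckLoop (current : List Int) (idx : Int) : Int :=
  if idx < PySem.List.len current then
    if PySem.List.pyGetD current idx 0 ≠ PySem.List.pyGetD current 0 0 then 0
    else pvCheckLoop current (idx + 1)
  else 1
termination_by (PySem.List.len current - idx).toNat
decreasing_by omega

def is_polynomial_degree (arr : List Int) (degree : Int) : Int :=
  let current : List Int :=
    (PySem.List.pyRange 0 (PySem.List.len arr) 1).foldl
      (fun c ci => c ++ [PySem.List.pyGetD arr ci 0]) []
  pvCheckLoop (pvDiffLoop current 0 degree) 1

-- ===== PORT B =====
-- one Pascal step: row = [1] + [row[j] + row[j+1] for j in range(len(row)-1)] + [1]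
def pvPascalStep (row : List Int) : List Int :=
  [1] ++ (PySem.List.pyRange 0 (PySem.List.len row - 1) 1).map
    (fun j => PySem.List.pyGetD row j 0 + PySem.List.pyGetD row (j + 1) 0) ++ [1]

-- entry(i) = sum((-1)**j * row[j] * arr[i+k-j] for j in range(k+1))
def pvEntry (arr row : List Int) (k i : Int) : Int :=
  ((PySem.List.pyRange 0 (k + 1) 1).map
    (fun j => (-1 : Int) ^ j.toNat * PySem.List.pyGetD row j 0
      * PySem.List.pyGetD arr (i + k - j) 0)).sum

def is_polynomial_degree_alt (arr : List Int) (degree : Int) : Int :=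
  let k : Int := if degree > 0 then degree else 0
  let n : Int := PySem.List.len arr
  if n - k < 2 then 1
  else
    let row := (PySem.List.pyRange 0 k 1).foldl (fun r _ => pvPascalStep r) [1]
    let d0 := pvEntry arr row k 0
    if (PySem.List.pyRange 1 (n - k) 1).all (fun i => pvEntry arr row k i == d0) then 1 else 0

-- ===== PRECONDITION & SPEC =====
def Spec_is_polynomial_degree (arr : List Int) (degree : Int) (out : Int) : Prop := out = is_polynomial_degree_alt arr degree
instance (arr : List Int) (degree : Int) (out : Int) : Decidable (Spec_is_polynomial_degree arr degree out) := by unfold Spec_is_polynomial_degree; infer_instance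

-- ===== CLAIM (what is proved, stated in full; the proofs are below) =====
def Claim_equal_is_polynomial_degree : Prop := ∀ (arr : List Int) (degree : Int), Dom_is_polynomial_degree arr degree → Spec_is_polynomial_degree arr degree (is_polynomial_degree arr degree)

-- ===== LEMMAS AND PROOFS =====

-- the k-th finite-difference entry, as an alternating binomial sum (proof-side model)
def pvDent (arr : List Int) (k i : Nat) : Int :=
  ((List.range (k + 1)).map
    (fun j => (-1 : Int) ^ j * (k.choose j : Int) * arr.getD (i + k - j) 0)).sum

-- the full k-th difference list (proof-side model)
def pvDlist (arr : List Int) (k : Nat) : List Int :=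
  (List.range (arr.length - k)).map (pvDent arr k)

theorem pvSumRange (n : Nat) (f : Nat → Int) :
    ((List.range n).map f).sum = ∑ j ∈ Finset.range n, f j := by
  induction n with
  | zero => simp
  | succ m ih => simp [List.range_succ, Finset.sum_range_succ, ih]

theorem pvAllCongr {α : Type} (l : List α) (p q : α → Bool)
    (h : ∀ x ∈ l, p x = q x) : l.all p = l.all q := by
  induction l with
  | nil => rfl
  | cons a t ih => simp_all

theorem pvDent_finset (arr : List Int) (k i : Nat) :
    pvDent arr k i
      = ∑ j ∈ Finset.range (k + 1), (-1 : Int) ^ j * (k.choose j : Int) * arr.getD (i + k - j) 0 := by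
  rw [pvDent, pvSumRange]

theorem pvDent_zero (arr : List Int) (i : Nat) : pvDent arr 0 i = arr.getD i 0 := by
  simp [pvDent]

theorem pvDlist_zero (arr : List Int) : pvDlist arr 0 = arr := by
  apply List.ext_getElem
  · simp [pvDlist]
  · intro i h1 h2
    simp only [pvDlist, Nat.sub_zero, List.getElem_map, List.getElem_range, pvDent_zero]
    rw [List.getD_eq_getElem _ _ h2]

-- Pascal recurrence for the entries
theorem pvDent_succ (arr : List Int) (k i : Nat) :
    pvDent arr (k + 1) i = pvDent arr k (i + 1) - pvDent arr k i := by
  have e1 : pvDent arr (k + 1) i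
      = (∑ j ∈ Finset.range (k + 1),
          ((-1 : Int) ^ (j + 1) * (((k + 1).choose (j + 1) : Nat) : Int) * arr.getD (i + k - j) 0))
        + arr.getD (i + k + 1) 0 := by
    rw [pvDent_finset, Finset.sum_range_succ']
    congr 1
    · apply Finset.sum_congr rfl
      intro j hj
      have hx : i + (k + 1) - (j + 1) = i + k - j := by omega
      rw [hx]
    · have hx : i + (k + 1) = i + k + 1 := by omega
      simp [hx]
  have e4 : pvDent arr k (i + 1)
      = (∑ j ∈ Finset.range k,
          ((-1 : Int) ^ (j + 1) * ((k.choose (j + 1) : Nat) : Int) * arr.getD (i + k - j) 0))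
        + arr.getD (i + k + 1) 0 := by
    rw [pvDent_finset, Finset.sum_range_succ']
    congr 1
    · apply Finset.sum_congr rfl
      intro j hj
      have hx : i + 1 + k - (j + 1) = i + k - j := by omega
      rw [hx]
    · have hx : i + 1 + k = i + k + 1 := by omega
      simp [hx]
  have esplit : ∀ j ∈ Finset.range (k + 1),
      (-1 : Int) ^ (j + 1) * (((k + 1).choose (j + 1) : Nat) : Int) * arr.getD (i + k - j) 0
      = -((-1 : Int) ^ j * ((k.choose j : Nat) : Int) * arr.getD (i + k - j) 0)
        + (-1 : Int) ^ (j + 1) * ((k.choose (j + 1) : Nat) : Int) * arr.getD (i + k - j) 0 := by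
    intro j hj
    rw [Nat.choose_succ_succ]
    push_cast
    ring
  have e3 : ∑ j ∈ Finset.range (k + 1),
        ((-1 : Int) ^ (j + 1) * ((k.choose (j + 1) : Nat) : Int) * arr.getD (i + k - j) 0)
      = ∑ j ∈ Finset.range k,
        ((-1 : Int) ^ (j + 1) * ((k.choose (j + 1) : Nat) : Int) * arr.getD (i + k - j) 0) := by
    rw [Finset.sum_range_succ]
    simp [Nat.choose_succ_self]
  rw [e1, Finset.sum_congr rfl esplit, Finset.sum_add_distrib, e3, e4, pvDent_finset]
  rw [Finset.sum_neg_distrib]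
  ring

theorem fd_map (l : List Int) :
    first_difference l
      = (List.range (l.length - 1)).map (fun i => l.getD (i + 1) 0 - l.getD i 0) := by
  unfold first_difference
  rw [PySem.List.foldl_append_singleton_eq_map, PySem.List.pyRange_one]
  simp only [List.map_map, List.nil_append]
  have hn : ((PySem.List.len l : Int) - 1 - 0).toNat = l.length - 1 := by
    simp only [PySem.List.len_eq]
    omega
  rw [hn]
  apply List.map_congr_left
  intro m hm
  have h1 : ((m : Int) + 1) = ((m + 1 : Nat) : Int) := by push_cast; ring
  have h2 : ((0 : Int) + (m : Int)) = ((m : Nat) : Int) := by ring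
  simp only [Function.comp_apply, h2, h1, PySem.List.pyGetD_natCast]

theorem fd_Dlist (arr : List Int) (k : Nat) :
    first_difference (pvDlist arr k) = pvDlist arr (k + 1) := by
  rw [fd_map]
  have hl : (pvDlist arr k).length = arr.length - k := by simp [pvDlist]
  rw [hl]
  have hn : arr.length - k - 1 = arr.length - (k + 1) := by omega
  rw [hn]
  unfold pvDlist
  apply List.map_congr_left
  intro m hm
  simp only [List.mem_range] at hm
  rw [PySem.List.getD_map_range _ _ _ _ (by omega), PySem.List.getD_map_range _ _ _ _ (by omega)]
  exact (pvDent_succ arr k m).symm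

theorem pvDiffLoop_iter (cur : List Int) (d degree : Int) :
    pvDiffLoop cur d degree = first_difference^[(degree - d).toNat] cur := by
  fun_induction pvDiffLoop with
  | case1 cur d h ih =>
    rw [ih]
    have hx : (degree - d).toNat = (degree - (d + 1)).toNat + 1 := by omega
    rw [hx, Function.iterate_succ_apply]
  | case2 cur d h =>
    have hx : (degree - d).toNat = 0 := by omega
    simp [hx]

theorem iterate_Dlist (arr : List Int) (t : Nat) :
    first_difference^[t] arr = pvDlist arr t := by
  induction t with
  | zero => simp [pvDlist_zero]
  | succ m ih => rw [Function.iterate_succ_apply', ih, fd_Dlist]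

theorem pvCheckLoop_all (l : List Int) (idx : Int) :
    pvCheckLoop l idx
      = if (PySem.List.pyRange idx (PySem.List.len l) 1).all
            (fun m => PySem.List.pyGetD l m 0 == PySem.List.pyGetD l 0 0)
        then 1 else 0 := by
  fun_induction pvCheckLoop with
  | case1 idx h h2 =>
    rw [PySem.List.pyRange_one_cons h]
    simp only [List.all_cons]
    have : (PySem.List.pyGetD l idx 0 == PySem.List.pyGetD l 0 0) = false := by
      simpa using h2
    simp [this]
  | case2 idx h h2 ih =>
    rw [ih, PySem.List.pyRange_one_cons h]
    simp only [List.all_cons]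
    have : (PySem.List.pyGetD l idx 0 == PySem.List.pyGetD l 0 0) = true := by
      simpa using h2
    simp [this]
  | case3 idx h =>
    rw [PySem.List.pyRange_one_eq_nil (by omega)]
    simp

theorem foldl_const_iterate {α β : Type} (g : α → α) (l : List β) (init : α) :
    l.foldl (fun r _ => g r) init = g^[l.length] init := by
  induction l generalizing init with
  | nil => rfl
  | cons x t ih =>
    simp only [List.foldl_cons, List.length_cons, ih]
    rw [Function.iterate_succ_apply]

theorem pascal_row (k : Nat) :
    pvPascalStep^[k] [1] = (List.range (k + 1)).map (fun j => ((k.choose j : Nat) : Int)) := by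
  induction k with
  | zero => simp [List.range_succ]
  | succ m ih =>
    rw [Function.iterate_succ_apply', ih]
    unfold pvPascalStep
    have hlen : PySem.List.len ((List.range (m + 1)).map (fun j => ((m.choose j : Nat) : Int))) - 1
        = ((m : Nat) : Int) := by
      simp [PySem.List.len_eq]
    rw [hlen, PySem.List.pyRange_zero_natCast, List.map_map]
    have lhs_inner : ∀ j ∈ List.range m,
        ((fun j => PySem.List.pyGetD ((List.range (m + 1)).map (fun j => ((m.choose j : Nat) : Int))) j 0
            + PySem.List.pyGetD ((List.range (m + 1)).map (fun j => ((m.choose j : Nat) : Int))) (j + 1) 0)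
          ∘ (fun n : Nat => (n : Int))) j
        = ((m.choose j : Nat) : Int) + ((m.choose (j + 1) : Nat) : Int) := by
      intro j hj
      simp only [List.mem_range] at hj
      have h1 : ((j : Int) + 1) = ((j + 1 : Nat) : Int) := by push_cast; ring
      simp only [Function.comp_apply, h1, PySem.List.pyGetD_natCast]
      rw [PySem.List.getD_map_range _ _ _ _ (by omega), PySem.List.getD_map_range _ _ _ _ (by omega)]
    rw [List.map_congr_left lhs_inner]
    rw [show m + 1 + 1 = (m + 1) + 1 from rfl, List.range_succ_eq_map, List.range_succ]
    simp [List.map_map, Nat.choose_succ_succ, Function.comp_def]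

theorem pvEntry_dent (arr : List Int) (K I : Nat) :
    pvEntry arr ((List.range (K + 1)).map (fun j => ((K.choose j : Nat) : Int))) (K : Int) (I : Int)
      = pvDent arr K I := by
  unfold pvEntry pvDent
  have hc : ((K : Int) + 1) = ((K + 1 : Nat) : Int) := by push_cast; ring
  rw [hc, PySem.List.pyRange_zero_natCast, List.map_map]
  apply congrArg List.sum
  apply List.map_congr_left
  intro j hj
  simp only [List.mem_range] at hj
  have h3 : ((I : Int) + (K : Int) - (j : Int)) = ((I + K - j : Nat) : Int) := by omega
  simp only [Function.comp_apply, h3, PySem.List.pyGetD_natCast, Int.toNat_natCast]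
  rw [PySem.List.getD_map_range _ _ _ _ hj]

-- ===== VERDICT (by name: the statement is the Claim_ definition above) =====
theorem is_polynomial_degree_spec : Claim_equal_is_polynomial_degree := by
  intro arr degree _
  unfold Spec_is_polynomial_degree
  simp only [is_polynomial_degree, is_polynomial_degree_alt]
  have hcopy : (PySem.List.pyRange 0 (PySem.List.len arr) 1).foldl
      (fun c ci => c ++ [PySem.List.pyGetD arr ci 0]) [] = arr := by
    rw [PySem.List.foldl_pyRange_zero_pyGetD arr 0 (fun acc x => acc ++ [x]) []]
    exact PySem.List.foldl_append_singleton_eq_self arr []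
  rw [hcopy, pvDiffLoop_iter, iterate_Dlist]
  have hz : (degree - 0).toNat = degree.toNat := by omega
  rw [hz]
  have hkK : (if degree > 0 then degree else 0) = ((degree.toNat : Nat) : Int) := by
    split_ifs with h <;> omega
  rw [hkK]
  by_cases hsmall : (PySem.List.len arr : Int) - ((degree.toNat : Nat) : Int) < 2
  · rw [if_pos hsmall]
    have hlen : ((pvDlist arr degree.toNat).length : Int) ≤ 1 := by
      simp only [pvDlist, List.length_map, List.length_range]
      simp only [PySem.List.len_eq] at hsmall
      omega
    rw [pvCheckLoop]
    rw [if_neg (by simp only [PySem.List.len_eq]; omega)]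
  · rw [if_neg hsmall]
    simp only [PySem.List.len_eq] at hsmall
    have hK : degree.toNat ≤ arr.length := by omega
    rw [pvCheckLoop_all]
    have hrow : (PySem.List.pyRange 0 ((degree.toNat : Nat) : Int) 1).foldl
        (fun r _ => pvPascalStep r) [1]
        = (List.range (degree.toNat + 1)).map (fun j => ((degree.toNat.choose j : Nat) : Int)) := by
      rw [foldl_const_iterate]
      have hl : (PySem.List.pyRange 0 ((degree.toNat : Nat) : Int) 1).length = degree.toNat := by
        rw [PySem.List.length_pyRange_one]
        omega
      rw [hl, pascal_row]
    rw [hrow]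
    have hlen2 : (PySem.List.len (pvDlist arr degree.toNat) : Int)
        = (PySem.List.len arr : Int) - ((degree.toNat : Nat) : Int) := by
      simp only [PySem.List.len_eq, pvDlist, List.length_map, List.length_range]
      omega
    rw [hlen2]
    simp only [PySem.List.len_eq]
    have hall : (PySem.List.pyRange 1 ((arr.length : Int) - ((degree.toNat : Nat) : Int)) 1).all
          (fun m => PySem.List.pyGetD (pvDlist arr degree.toNat) m 0
            == PySem.List.pyGetD (pvDlist arr degree.toNat) 0 0)
        = (PySem.List.pyRange 1 ((arr.length : Int) - ((degree.toNat : Nat) : Int)) 1).all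
          (fun i => pvEntry arr
              ((List.range (degree.toNat + 1)).map (fun j => ((degree.toNat.choose j : Nat) : Int)))
              ((degree.toNat : Nat) : Int) i
            == pvEntry arr
              ((List.range (degree.toNat + 1)).map (fun j => ((degree.toNat.choose j : Nat) : Int)))
              ((degree.toNat : Nat) : Int) 0) := by
      apply pvAllCongr
      intro x hx
      rw [PySem.List.mem_pyRange_one] at hx
      obtain ⟨xN, rfl⟩ : ∃ n : Nat, x = ((n : Nat) : Int) := ⟨x.toNat, by omega⟩
      have hxlt : xN < arr.length - degree.toNat := by omega
      have hd0 : PySem.List.pyGetD (pvDlist arr degree.toNat) 0 0 = pvDent arr degree.toNat 0 := by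
        rw [show (0 : Int) = ((0 : Nat) : Int) from rfl, PySem.List.pyGetD_natCast]
        unfold pvDlist
        rw [PySem.List.getD_map_range _ _ _ _ (by omega)]
      have hdx : PySem.List.pyGetD (pvDlist arr degree.toNat) ((xN : Nat) : Int) 0
          = pvDent arr degree.toNat xN := by
        rw [PySem.List.pyGetD_natCast]
        unfold pvDlist
        rw [PySem.List.getD_map_range _ _ _ _ hxlt]
      have hex : pvEntry arr
          ((List.range (degree.toNat + 1)).map (fun j => ((degree.toNat.choose j : Nat) : Int)))
          ((degree.toNat : Nat) : Int) ((xN : Nat) : Int) = pvDent arr degree.toNat xN := by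
        rw [pvEntry_dent]
      have he0 : pvEntry arr
          ((List.range (degree.toNat + 1)).map (fun j => ((degree.toNat.choose j : Nat) : Int)))
          ((degree.toNat : Nat) : Int) 0 = pvDent arr degree.toNat 0 := by
        rw [show (0 : Int) = ((0 : Nat) : Int) from rfl, pvEntry_dent]
      rw [hd0, hdx, hex, he0]
    simp only [hall]
    rfl
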